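-- pv_equiv track=rewrite | github.com/100-hours-a-week/3-team-Tasteam-data-seeder | apps/seeder/build_dml_from_existing.py | map_periods_to_weekly
-- ===== SOURCE A (Python) =====
-- def map_periods_to_weekly(periods):
--     # Google: day 0=Sunday ... 6=Saturday
--     # DML: day_of_week 1=Mon ... 7=Sun
--     day_map = {0: 7, 1: 1, 2: 2, 3: 3, 4: 4, 5: 5, 6: 6}
--     by_day = {}
--     for p in periods:
--         o = p.get("open")
--         c = p.get("close")
--         if not o:
--             continue
--         day = o.get("day")
--         if day is None:
--             continue
--         # take first period per day (테스트용)
--         if day in by_day: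
--             continue
--         open_time = f"{o.get('hour', 0):02d}:{o.get('minute', 0):02d}"
--         close_time = None
--         if c:
--             close_time = f"{c.get('hour', 0):02d}:{c.get('minute', 0):02d}"
--         by_day[day] = (open_time, close_time)
--     weekly = {}
--     for g_day, d_day in day_map.items():
--         if g_day in by_day:
--             weekly[d_day] = (*by_day[g_day], False)
--         else:
--             weekly[d_day] = (None, None, True)
--     return weekly
-- ===== SOURCE B (Python) =====
-- def map_periods_to_weekly(periods):
--     day_map = {0: 7, 1: 1, 2: 2, 3: 3, 4: 4, 5: 5, 6: 6}
--     weekly = {d: (None, None, True) for d in (7, 1, 2, 3, 4, 5, 6)}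
--     # Walk periods BACK TO FRONT and overwrite unconditionally: the first
--     # period of each day in original order is processed last, so it wins.
--     # No seen-set and no intermediate index are needed.
--     for p in reversed(periods):
--         o = p.get("open")
--         if not o:
--             continue
--         day = o.get("day")
--         if day not in day_map:
--             continue
--         c = p.get("close")
--         open_time = f"{o.get('hour', 0):02d}:{o.get('minute', 0):02d}"
--         close_time = f"{c.get('hour', 0):02d}:{c.get('minute', 0):02d}" if c else None
--         weekly[day_map[day]] = (open_time, close_time, False)
--     return weekly
-- ===== Notes on version B (the rewrite author's own statement) =====
-- stated objective: alternative
-- what changed: B drops A's by_day index, dedup check and trailing day_map loop entirely: it pre-fills weekly with the seven closed days and walks periods in REVERSE with unconditional overwrite, so the first period per day wins by being written last.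
import Mathlib
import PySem

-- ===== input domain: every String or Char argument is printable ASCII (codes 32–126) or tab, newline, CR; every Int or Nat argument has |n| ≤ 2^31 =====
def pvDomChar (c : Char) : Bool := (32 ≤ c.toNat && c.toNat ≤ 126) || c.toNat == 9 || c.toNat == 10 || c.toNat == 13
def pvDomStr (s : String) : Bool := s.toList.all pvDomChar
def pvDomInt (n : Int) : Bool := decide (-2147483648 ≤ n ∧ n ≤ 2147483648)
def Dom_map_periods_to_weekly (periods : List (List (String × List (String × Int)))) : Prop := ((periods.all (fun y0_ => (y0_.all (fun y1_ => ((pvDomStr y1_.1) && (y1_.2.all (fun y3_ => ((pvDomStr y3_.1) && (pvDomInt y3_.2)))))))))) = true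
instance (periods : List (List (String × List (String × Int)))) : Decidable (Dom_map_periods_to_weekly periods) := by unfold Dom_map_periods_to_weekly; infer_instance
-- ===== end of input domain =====

-- B drops A's by_day index, dedup check and trailing day_map loop: it pre-fills weekly with the
-- seven closed days and walks periods in REVERSE with unconditional overwrite (first period per
-- day wins by being written last); objective: alternative decomposition, same cost.

-- f"{n:02d}" (both Pythons use this very f-string) = str(n).zfill(2)
def pvFmt02 (n : Int) : String := PySem.Str.zfill (PySem.Int.toStr n) 2

-- day_map = {0: 7, 1: 1, 2: 2, 3: 3, 4: 4, 5: 5, 6: 6} (shared literal of both Pythons)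
def pvDayMap : List (Int × Int) := [(0,7),(1,1),(2,2),(3,3),(4,4),(5,5),(6,6)]

-- ===== PORT A =====
-- loop body of A's first loop ('for p in periods')
def pvStepA (byDay : PySem.Dict Int (String × Option String))
    (p : List (String × List (String × Int))) : PySem.Dict Int (String × Option String) :=
  match (PySem.Dict.mk p).get? "open", (PySem.Dict.mk p).get? "close" with
  | none, _ => byDay                                    -- 'if not o: continue' (o is None)
  | some o, c? =>
    if o = [] then byDay else                           -- 'if not o: continue' (o an empty dict)
    match (PySem.Dict.mk o).get? "day" with
    | none => byDay                                     -- 'if day is None: continue'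
    | some day =>
      if (byDay.contains day : Bool) then byDay else    -- 'if day in by_day: continue'
      byDay.insert day
        (pvFmt02 ((PySem.Dict.mk o).getD "hour" 0) ++ ":" ++ pvFmt02 ((PySem.Dict.mk o).getD "minute" 0),
         match c? with
         | none => none
         | some c => if c = [] then none
             else some (pvFmt02 ((PySem.Dict.mk c).getD "hour" 0) ++ ":" ++ pvFmt02 ((PySem.Dict.mk c).getD "minute" 0)))

-- A's second loop ('for g_day, d_day in day_map.items()'); by_day[g_day] guarded by 'g_day in by_day'
def pvFinalize (byDay : PySem.Dict Int (String × Option String)) :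
    PySem.Dict Int (Option String × Option String × Bool) :=
  pvDayMap.foldl (fun weekly gd =>
    weekly.insert gd.2
      (if (byDay.contains gd.1 : Bool) then
        (some (byDay.getD gd.1 ("", none)).1, (byDay.getD gd.1 ("", none)).2, false)
      else (none, none, true))) PySem.Dict.empty

def map_periods_to_weekly (periods : List (List (String × List (String × Int)))) :
    List (Int × Option String × Option String × Bool) :=
  (pvFinalize (periods.foldl pvStepA PySem.Dict.empty)).items

-- ===== PORT B =====
-- weekly = {d: (None, None, True) for d in (7, 1, 2, 3, 4, 5, 6)}
def pvInitWeekly : PySem.Dict Int (Option String × Option String × Bool) :=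
  PySem.Dict.mk [(7,(none,none,true)),(1,(none,none,true)),(2,(none,none,true)),(3,(none,none,true)),
                 (4,(none,none,true)),(5,(none,none,true)),(6,(none,none,true))]

-- loop body of B's reversed pass: no seen-set, unconditional overwrite
def pvStepB (weekly : PySem.Dict Int (Option String × Option String × Bool))
    (p : List (String × List (String × Int))) :
    PySem.Dict Int (Option String × Option String × Bool) :=
  match (PySem.Dict.mk p).get? "open" with
  | none => weekly                                      -- 'if not o: continue'
  | some o =>
    if o = [] then weekly else
    match (PySem.Dict.mk o).get? "day" with
    | none => weekly                                    -- missing 'day' = None, never in day_map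
    | some day =>
      match (PySem.Dict.mk pvDayMap).get? day with
      | none => weekly                                  -- 'if day not in day_map: continue'
      | some dd =>
        weekly.insert dd
          (some (pvFmt02 ((PySem.Dict.mk o).getD "hour" 0) ++ ":" ++ pvFmt02 ((PySem.Dict.mk o).getD "minute" 0)),
           (match (PySem.Dict.mk p).get? "close" with
            | none => none
            | some c => if c = [] then none
                else some (pvFmt02 ((PySem.Dict.mk c).getD "hour" 0) ++ ":" ++ pvFmt02 ((PySem.Dict.mk c).getD "minute" 0))),
           false)

def map_periods_to_weekly_alt (periods : List (List (String × List (String × Int)))) :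
    List (Int × Option String × Option String × Bool) :=
  (periods.reverse.foldl pvStepB pvInitWeekly).items    -- 'for p in reversed(periods)'

-- ===== PRECONDITION & SPEC =====
def Spec_map_periods_to_weekly (periods : List (List (String × List (String × Int)))) (out : List (Int × Option String × Option String × Bool)) : Prop := out = map_periods_to_weekly_alt periods
instance (periods : List (List (String × List (String × Int)))) (out : List (Int × Option String × Option String × Bool)) : Decidable (Spec_map_periods_to_weekly periods out) := by unfold Spec_map_periods_to_weekly; infer_instance

-- ===== CLAIM (what is proved, stated in full; the proofs are below) =====
def Claim_equal_map_periods_to_weekly : Prop := ∀ (periods : List (List (String × List (String × Int)))), Dom_map_periods_to_weekly periods → Spec_map_periods_to_weekly periods (map_periods_to_weekly periods)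

-- ===== LEMMAS AND PROOFS =====

-- the (day, open_time, close_time) a period contributes, if it passes the shared filters
def pvExtract (p : List (String × List (String × Int))) : Option (Int × String × Option String) :=
  match (PySem.Dict.mk p).get? "open" with
  | none => none
  | some o =>
    if o = [] then none else
    match (PySem.Dict.mk o).get? "day" with
    | none => none
    | some day =>
      some (day,
        pvFmt02 ((PySem.Dict.mk o).getD "hour" 0) ++ ":" ++ pvFmt02 ((PySem.Dict.mk o).getD "minute" 0),
        match (PySem.Dict.mk p).get? "close" with
        | none => none
        | some c => if c = [] then none
            else some (pvFmt02 ((PySem.Dict.mk c).getD "hour" 0) ++ ":" ++ pvFmt02 ((PySem.Dict.mk c).getD "minute" 0)))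

-- pvExtract mapped through day_map, as B consumes it
def pvExtractB (p : List (String × List (String × Int))) :
    Option (Int × (Option String × Option String × Bool)) :=
  match pvExtract p with
  | none => none
  | some (day, ot, ct) =>
    match (PySem.Dict.mk pvDayMap).get? day with
    | none => none
    | some dd => some (dd, (some ot, ct, false))

theorem pvStepA_eq (d : PySem.Dict Int (String × Option String))
    (p : List (String × List (String × Int))) :
    pvStepA d p = match pvExtract p with
      | none => d
      | some (day, ot, ct) => if (d.contains day : Bool) then d else d.insert day (ot, ct) := by
  unfold pvStepA pvExtract
  cases (PySem.Dict.mk p).get? "open" with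
  | none => rfl
  | some o =>
    by_cases he : o = []
    · simp [he]
    · simp only [he, if_false]
      cases (PySem.Dict.mk o).get? "day" with
      | none => rfl
      | some day => rfl

theorem pvStepB_eq (w : PySem.Dict Int (Option String × Option String × Bool))
    (p : List (String × List (String × Int))) :
    pvStepB w p = match pvExtractB p with
      | none => w
      | some (dd, t) => w.insert dd t := by
  unfold pvStepB pvExtractB pvExtract
  cases (PySem.Dict.mk p).get? "open" with
  | none => rfl
  | some o =>
    by_cases he : o = []
    · simp [he]
    · simp only [he, if_false]
      cases (PySem.Dict.mk o).get? "day" with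
      | none => rfl
      | some day =>
        dsimp only
        cases (PySem.Dict.mk pvDayMap).get? day with
        | none => rfl
        | some dd => rfl

-- value of the FIRST period with Google day g (A's dedup keeps exactly that one)
def pvFirstA : List (List (String × List (String × Int))) → Int → Option (String × Option String)
  | [], _ => none
  | p :: ps, g =>
    match pvExtract p with
    | some (day, ot, ct) => if day = g then some (ot, ct) else pvFirstA ps g
    | none => pvFirstA ps g

-- value of the FIRST period mapping to DML day dd (B's reverse-overwrite keeps exactly that one)
def pvFirstB : List (List (String × List (String × Int))) → Int →
    Option (Option String × Option String × Bool)
  | [], _ => none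
  | p :: ps, dd =>
    match pvExtractB p with
    | some (k, t) => if k = dd then some t else pvFirstB ps dd
    | none => pvFirstB ps dd

theorem pvA_get (ps : List (List (String × List (String × Int))))
    (d : PySem.Dict Int (String × Option String)) (g : Int) :
    (ps.foldl pvStepA d).get? g = (d.get? g).or (pvFirstA ps g) := by
  induction ps generalizing d with
  | nil => simp [pvFirstA]
  | cons p ps ih =>
    rw [List.foldl_cons, pvStepA_eq]
    cases he : pvExtract p with
    | none => simp only [pvFirstA, he]; exact ih d
    | some v =>
      obtain ⟨day, ot, ct⟩ := v
      simp only [pvFirstA, he]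
      by_cases hc : (d.contains day : Bool)
      · simp only [hc, if_true]
        rw [ih d]
        by_cases hg : day = g
        · subst hg
          have : (d.get? day).isSome := by rw [← PySem.Dict.contains_eq_isSome_get?]; exact hc
          cases hd : d.get? day with
          | none => rw [hd] at this; simp at this
          | some v => simp
        · simp [hg]
      · simp only [Bool.not_eq_true] at hc
        simp only [hc, Bool.false_eq_true, if_false]
        rw [ih (d.insert day (ot, ct)), PySem.Dict.get?_insert]
        by_cases hg : g = day
        · subst hg
          have hn : d.get? g = none := by
            cases hd : d.get? g with
            | none => rfl
            | some v =>
              have : d.contains g = true := by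
                rw [PySem.Dict.contains_eq_isSome_get?, hd]; rfl
              rw [this] at hc; exact absurd hc (by simp)
          simp [hn]
        · have hgd : day ≠ g := fun h => hg h.symm
          simp [hg, hgd]

theorem pvB_get (ps : List (List (String × List (String × Int))))
    (w : PySem.Dict Int (Option String × Option String × Bool)) (dd : Int) :
    (ps.foldr (fun x y => pvStepB y x) w).get? dd = (pvFirstB ps dd).or (w.get? dd) := by
  induction ps with
  | nil => simp [pvFirstB]
  | cons p ps ih =>
    rw [List.foldr_cons, pvStepB_eq]
    cases he : pvExtractB p with
    | none => simp only [pvFirstB, he]; exact ih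
    | some v =>
      obtain ⟨k, t⟩ := v
      simp only [pvFirstB, he]
      rw [PySem.Dict.get?_insert]
      by_cases hk : dd = k
      · subst hk; simp
      · have hkd : k ≠ dd := fun h => hk h.symm
        simp [hk, hkd, ih]

-- full inversion of the day_map lookup
theorem pvDayMap_inv (day dd : Int) (h : (PySem.Dict.mk pvDayMap).get? day = some dd) :
    (day = 0 ∧ dd = 7) ∨ (day = dd ∧ 1 ≤ dd ∧ dd ≤ 6) := by
  simp only [pvDayMap, PySem.Dict.get?_mk_cons] at h
  split_ifs at h with g0 g1 g2 g3 g4 g5 g6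
  · exact Or.inl ⟨(eq_of_beq g0).symm, (Option.some_inj.mp h).symm⟩
  · have := (eq_of_beq g1).symm; have := (Option.some_inj.mp h).symm; exact Or.inr (by omega)
  · have := (eq_of_beq g2).symm; have := (Option.some_inj.mp h).symm; exact Or.inr (by omega)
  · have := (eq_of_beq g3).symm; have := (Option.some_inj.mp h).symm; exact Or.inr (by omega)
  · have := (eq_of_beq g4).symm; have := (Option.some_inj.mp h).symm; exact Or.inr (by omega)
  · have := (eq_of_beq g5).symm; have := (Option.some_inj.mp h).symm; exact Or.inr (by omega)
  · have := (eq_of_beq g6).symm; have := (Option.some_inj.mp h).symm; exact Or.inr (by omega)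
  · have h' : (none : Option Int) = some dd := h
    simp at h'

theorem pvFirstB_eq (g dd : Int)
    (hfwd : (PySem.Dict.mk pvDayMap).get? g = some dd)
    (hinj : ∀ day, (PySem.Dict.mk pvDayMap).get? day = some dd → day = g)
    (ps : List (List (String × List (String × Int)))) :
    pvFirstB ps dd = (pvFirstA ps g).map (fun v => (some v.1, v.2, false)) := by
  induction ps with
  | nil => rfl
  | cons p ps ih =>
    cases he : pvExtract p with
    | none =>
      have heB : pvExtractB p = none := by unfold pvExtractB; rw [he]
      simp only [pvFirstA, pvFirstB, he, heB]; exact ih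
    | some v =>
      obtain ⟨day, ot, ct⟩ := v
      by_cases hg : day = g
      · subst hg
        have heB : pvExtractB p = some (dd, (some ot, ct, false)) := by
          unfold pvExtractB; rw [he]; dsimp only; rw [hfwd]
        simp [pvFirstA, pvFirstB, he, heB]
      · cases hm : (PySem.Dict.mk pvDayMap).get? day with
        | none =>
          have heB : pvExtractB p = none := by
            unfold pvExtractB; rw [he]; dsimp only; rw [hm]
          simp only [pvFirstA, pvFirstB, he, heB, hg, if_false]; exact ih
        | some k =>
          have heB : pvExtractB p = some (k, (some ot, ct, false)) := by
            unfold pvExtractB; rw [he]; dsimp only; rw [hm]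
          have hk : k ≠ dd := fun hkd => hg (hinj day (hkd ▸ hm))
          simp only [pvFirstA, pvFirstB, he, heB, hg, hk, if_false]; exact ih

-- the value A's second loop writes for DML day of Google day g
def pvF (d : PySem.Dict Int (String × Option String)) (g : Int) :
    Option String × Option String × Bool :=
  if (d.contains g : Bool) then (some (d.getD g ("", none)).1, (d.getD g ("", none)).2, false)
  else (none, none, true)

theorem pvFinalize_eq (d : PySem.Dict Int (String × Option String)) :
    pvFinalize d = PySem.Dict.mk
      [(7, pvF d 0), (1, pvF d 1), (2, pvF d 2), (3, pvF d 3), (4, pvF d 4), (5, pvF d 5), (6, pvF d 6)] := rfl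

theorem pvF_eq (d : PySem.Dict Int (String × Option String)) (g : Int) :
    pvF d g = match d.get? g with
      | some v => (some v.1, v.2, false)
      | none => (none, none, true) := by
  cases hg : d.get? g with
  | none =>
    have hc : d.contains g = false := by
      rw [PySem.Dict.contains_eq_isSome_get?, hg]; rfl
    simp [pvF, hc]
  | some v =>
    have hc : d.contains g = true := by
      rw [PySem.Dict.contains_eq_isSome_get?, hg]; rfl
    have hd := PySem.Dict.getD_of_get?_eq_some (d := d) (d0 := ("", none)) hg
    simp [pvF, hc, hd]

def pvW (a b c d e f g : Option String × Option String × Bool) :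
    PySem.Dict Int (Option String × Option String × Bool) :=
  PySem.Dict.mk [(7,a),(1,b),(2,c),(3,d),(4,e),(5,f),(6,g)]

theorem pvExtractB_range (p : List (String × List (String × Int))) (k : Int)
    (t : Option String × Option String × Bool) (h : pvExtractB p = some (k, t)) :
    1 ≤ k ∧ k ≤ 7 := by
  unfold pvExtractB at h
  cases he : pvExtract p with
  | none => rw [he] at h; exact absurd h (by simp)
  | some v =>
    obtain ⟨day, ot, ct⟩ := v
    rw [he] at h
    dsimp only at h
    cases hm : (PySem.Dict.mk pvDayMap).get? day with
    | none => rw [hm] at h; exact absurd h (by simp)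
    | some k0 =>
      rw [hm] at h
      have hk : k0 = k := by simpa using congrArg (fun x => (Option.map Prod.fst x).getD 0) h
      rcases pvDayMap_inv day k0 hm with ⟨_, h2⟩ | ⟨_, h2, h3⟩ <;> omega

theorem pvShapeB (ps : List (List (String × List (String × Int)))) :
    ∃ a b c d e f g, ps.foldr (fun x y => pvStepB y x) pvInitWeekly = pvW a b c d e f g := by
  induction ps with
  | nil =>
    exact ⟨(none,none,true),(none,none,true),(none,none,true),(none,none,true),
           (none,none,true),(none,none,true),(none,none,true), rfl⟩
  | cons p ps ih =>
    obtain ⟨a, b, c, d, e, f, g, hW⟩ := ih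
    rw [List.foldr_cons, hW, pvStepB_eq]
    cases he : pvExtractB p with
    | none => exact ⟨a, b, c, d, e, f, g, rfl⟩
    | some v =>
      obtain ⟨k, t⟩ := v
      obtain ⟨h1, h7⟩ := pvExtractB_range p k t he
      dsimp only
      interval_cases k
      · exact ⟨a, t, c, d, e, f, g, by
          apply PySem.Dict.ext; rw [PySem.Dict.items_insert]; norm_num [pvW, PySem.Dict.contains_mk]⟩
      · exact ⟨a, b, t, d, e, f, g, by
          apply PySem.Dict.ext; rw [PySem.Dict.items_insert]; norm_num [pvW, PySem.Dict.contains_mk]⟩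
      · exact ⟨a, b, c, t, e, f, g, by
          apply PySem.Dict.ext; rw [PySem.Dict.items_insert]; norm_num [pvW, PySem.Dict.contains_mk]⟩
      · exact ⟨a, b, c, d, t, f, g, by
          apply PySem.Dict.ext; rw [PySem.Dict.items_insert]; norm_num [pvW, PySem.Dict.contains_mk]⟩
      · exact ⟨a, b, c, d, e, t, g, by
          apply PySem.Dict.ext; rw [PySem.Dict.items_insert]; norm_num [pvW, PySem.Dict.contains_mk]⟩
      · exact ⟨a, b, c, d, e, f, t, by
          apply PySem.Dict.ext; rw [PySem.Dict.items_insert]; norm_num [pvW, PySem.Dict.contains_mk]⟩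
      · exact ⟨t, b, c, d, e, f, g, by
          apply PySem.Dict.ext; rw [PySem.Dict.items_insert]; norm_num [pvW, PySem.Dict.contains_mk]⟩

-- one weekly slot: A's value for Google day g equals B's slot for the matching DML day
theorem pvSlot_eq (ps : List (List (String × List (String × Int)))) (g dd : Int)
    (slot : Option String × Option String × Bool)
    (hfwd : (PySem.Dict.mk pvDayMap).get? g = some dd)
    (hinj : ∀ day, (PySem.Dict.mk pvDayMap).get? day = some dd → day = g)
    (hslot : slot = (pvFirstB ps dd).getD (none, none, true)) :
    pvF (ps.foldl pvStepA PySem.Dict.empty) g = slot := by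
  rw [pvF_eq, pvA_get ps PySem.Dict.empty g, PySem.Dict.get?_empty, Option.none_or]
  rw [pvFirstB_eq g dd hfwd hinj ps] at hslot
  cases hfa : pvFirstA ps g with
  | none => rw [hfa] at hslot; simp at hslot; simp [hslot]
  | some v => rw [hfa] at hslot; simp at hslot; simp [hslot]

-- ===== VERDICT (by name: the statement is the Claim_ definition above) =====
theorem map_periods_to_weekly_spec : Claim_equal_map_periods_to_weekly := by
  intro ps _
  unfold Spec_map_periods_to_weekly map_periods_to_weekly map_periods_to_weekly_alt
  rw [List.foldl_reverse]
  obtain ⟨a, b, c, d, e, f, g, hW⟩ := pvShapeB ps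
  rw [hW, pvFinalize_eq]
  have hget : ∀ dd : Int, (pvW a b c d e f g).get? dd =
      (pvFirstB ps dd).or (pvInitWeekly.get? dd) := by
    intro dd; rw [← hW]; exact pvB_get ps pvInitWeekly dd
  have hs7 : a = (pvFirstB ps 7).getD (none, none, true) := by
    have := hget 7; simpa [pvW, pvInitWeekly, PySem.Dict.get?_mk_cons] using this
  have hs1 : b = (pvFirstB ps 1).getD (none, none, true) := by
    have := hget 1; simpa [pvW, pvInitWeekly, PySem.Dict.get?_mk_cons] using this
  have hs2 : c = (pvFirstB ps 2).getD (none, none, true) := by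
    have := hget 2; simpa [pvW, pvInitWeekly, PySem.Dict.get?_mk_cons] using this
  have hs3 : d = (pvFirstB ps 3).getD (none, none, true) := by
    have := hget 3; simpa [pvW, pvInitWeekly, PySem.Dict.get?_mk_cons] using this
  have hs4 : e = (pvFirstB ps 4).getD (none, none, true) := by
    have := hget 4; simpa [pvW, pvInitWeekly, PySem.Dict.get?_mk_cons] using this
  have hs5 : f = (pvFirstB ps 5).getD (none, none, true) := by
    have := hget 5; simpa [pvW, pvInitWeekly, PySem.Dict.get?_mk_cons] using this
  have hs6 : g = (pvFirstB ps 6).getD (none, none, true) := by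
    have := hget 6; simpa [pvW, pvInitWeekly, PySem.Dict.get?_mk_cons] using this
  have inj : ∀ dd0 g0 : Int, (PySem.Dict.mk pvDayMap).get? g0 = some dd0 →
      ∀ day, (PySem.Dict.mk pvDayMap).get? day = some dd0 → 1 ≤ dd0 → day = g0 := by
    intro dd0 g0 h0 day h _
    rcases pvDayMap_inv day dd0 h with ⟨e1, e2⟩ | ⟨e1, e2, e3⟩ <;>
      rcases pvDayMap_inv g0 dd0 h0 with ⟨f1, f2⟩ | ⟨f1, f2, f3⟩ <;> omega
  have e0 := pvSlot_eq ps 0 7 a (by decide) (fun day h => inj 7 0 (by decide) day h (by norm_num)) hs7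
  have e1 := pvSlot_eq ps 1 1 b (by decide) (fun day h => inj 1 1 (by decide) day h (by norm_num)) hs1
  have e2 := pvSlot_eq ps 2 2 c (by decide) (fun day h => inj 2 2 (by decide) day h (by norm_num)) hs2
  have e3 := pvSlot_eq ps 3 3 d (by decide) (fun day h => inj 3 3 (by decide) day h (by norm_num)) hs3
  have e4 := pvSlot_eq ps 4 4 e (by decide) (fun day h => inj 4 4 (by decide) day h (by norm_num)) hs4
  have e5 := pvSlot_eq ps 5 5 f (by decide) (fun day h => inj 5 5 (by decide) day h (by norm_num)) hs5
  have e6 := pvSlot_eq ps 6 6 g (by decide) (fun day h => inj 6 6 (by decide) day h (by norm_num)) hs6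
  simp only [pvW]  -- both sides are literal item lists
  rw [e0, e1, e2, e3, e4, e5, e6]
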